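-- pv_equiv track=rewrite | github.com/ikostan/python | solutions/python/pig-latin/9/pig_latin.py | is_rule_3
-- ===== SOURCE A (Python) =====
-- def is_rule_3(text: str) -> bool:
--     """
--     Check if a word starts with zero or more consonants followed by "qu".
--
--     :param text:
--     :return:
--     """
--     if "qu" in text:
--         if text[:2] == "qu":
--             return True
--
--         for char in text[: text.index("qu")]:
--             if is_vowel(char):
--                 return False
--         return True
--     return False
--
-- def is_vowel(char: str) -> bool:
--     """
--     Check if a character is a vowel (a, e, i, o, or u).
--
--     :param char: The character to check
--     :return: True if the character is a vowel, False otherwise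
--     """
--     return char in "aeiou"
-- ===== SOURCE B (Python) =====
-- def is_rule_3(text: str) -> bool:
--     """One left-to-right pass: the word matches rule 3 iff its
--     first vowel is the u of a qu pair."""
--     prev = ''
--     for ch in text:
--         if ch in 'aeiou':
--             return ch == 'u' and prev == 'q'
--         prev = ch
--     return False
-- ===== Notes on version B (the rewrite author's own statement) =====
-- stated objective: simpler
-- what changed: Replaced A's substring test + index lookup + prefix loop (three scans) by a single left-to-right pass that remembers only the previous character: the word matches iff its first vowel is the u of a qu pair.
import Mathlib
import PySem

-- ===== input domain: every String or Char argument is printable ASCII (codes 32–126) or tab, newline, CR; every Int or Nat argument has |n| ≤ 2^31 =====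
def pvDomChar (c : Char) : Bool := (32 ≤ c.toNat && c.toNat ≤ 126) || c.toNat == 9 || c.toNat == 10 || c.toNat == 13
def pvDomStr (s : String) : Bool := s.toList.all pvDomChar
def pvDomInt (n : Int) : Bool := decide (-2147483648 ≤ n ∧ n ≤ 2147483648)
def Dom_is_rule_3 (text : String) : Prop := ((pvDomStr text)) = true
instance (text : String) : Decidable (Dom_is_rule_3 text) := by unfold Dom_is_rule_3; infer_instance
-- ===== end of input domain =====

-- B replaces A's three scans (substring test, index lookup, prefix loop) by one
-- left-to-right pass remembering only the previous character; objective: simpler.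

-- ===== PORT A =====
-- helper is_vowel(char): char in "aeiou"
def pv_is_vowel (char : String) : Bool := PySem.Str.isIn char "aeiou"

-- the `for char in text[: text.index("qu")]` loop: False at the first vowel, else True
def pvALoop : List Char → Bool
  | [] => true
  | c :: rest => if pv_is_vowel (String.singleton c) then false else pvALoop rest

-- text.index("qu") is guarded by '"qu" in text', so it equals text.find("qu") here
def is_rule_3 (text : String) : Bool :=
  if PySem.Str.isIn "qu" text then
    if PySem.Str.slice text none (some 2) == "qu" then true
    else pvALoop (PySem.Str.slice text none (some (PySem.Str.find text "qu"))).toList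
  else false

-- ===== PORT B =====
-- the single for-loop of Source B, carrying prev (a string, '' initially)
def pvBLoop (prev : String) : List Char → Bool
  | [] => false
  | c :: rest =>
      if PySem.Str.isIn (String.singleton c) "aeiou" then
        (c == 'u') && (prev == "q")
      else pvBLoop (String.singleton c) rest

def is_rule_3_alt (text : String) : Bool := pvBLoop "" text.toList

-- ===== PRECONDITION & SPEC =====
def Spec_is_rule_3 (text : String) (out : Bool) : Prop := out = is_rule_3_alt text
instance (text : String) (out : Bool) : Decidable (Spec_is_rule_3 text out) := by unfold Spec_is_rule_3; infer_instance

-- ===== CLAIM (what is proved, stated in full; the proofs are below) =====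
def Claim_equal_is_rule_3 : Prop := ∀ (text : String), Dom_is_rule_3 text → Spec_is_rule_3 text (is_rule_3 text)

-- ===== LEMMAS AND PROOFS =====

def pvVowelb (c : Char) : Bool := c == 'a' || c == 'e' || c == 'i' || c == 'o' || c == 'u'

theorem pv_vowel_eq (c : Char) : PySem.Str.isIn (String.singleton c) "aeiou" = pvVowelb c := by
  rw [Bool.eq_iff_iff, PySem.Str.isIn_iff_infix]
  simp [List.singleton_infix_iff, String.toList_singleton, pvVowelb]
  tauto

def Acore (cs : List Char) : Bool :=
  if PySem.Chars.isIn ['q','u'] cs then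
    if PySem.Chars.slice cs none (some 2) = ['q','u'] then true
    else pvALoop (PySem.Chars.slice cs none (some (PySem.Chars.find cs ['q','u'])))
  else false

theorem pv_bridgeA (text : String) : is_rule_3 text = Acore text.toList := by
  have hq : String.toList "qu" = ['q','u'] := by decide
  simp [is_rule_3, Acore, hq, ← String.toList_inj]

theorem pvALoop_cons (c : Char) (cs : List Char) :
    pvALoop (c :: cs) = if pvVowelb c then false else pvALoop cs := by
  simp only [pvALoop, pv_is_vowel, pv_vowel_eq]

theorem pv_singleton_eq_q (c : Char) : (String.singleton c == "q") = (c == 'q') := by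
  have : (String.singleton c = "q") ↔ (c = 'q') := by
    rw [← String.toList_inj, String.toList_singleton]
    constructor
    · intro h; have := congrArg List.head? h; simpa using this
    · intro h; rw [h]; decide
  simp [this]

-- find on a cons when no occurrence starts at 0: shifts by one
theorem pv_find_cons (c : Char) (cs : List Char)
    (hin : PySem.Chars.isIn ['q','u'] (c :: cs) = true)
    (hpre : ¬ (['q','u'] <+: (c :: cs))) :
    PySem.Chars.isIn ['q','u'] cs = true ∧
    (PySem.Chars.find (c :: cs) ['q','u']).toNat
      = (PySem.Chars.find cs ['q','u']).toNat + 1 := by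
  have hf0 : 0 ≤ PySem.Chars.find (c :: cs) ['q','u'] := by
    rw [PySem.Chars.find_nonneg_iff]; exact (PySem.Chars.isIn_iff_infix _ _).mp hin
  obtain ⟨hf1, hf2⟩ := PySem.Chars.find_spec (s := c :: cs) (sub := ['q','u']) hf0
  set f := (PySem.Chars.find (c :: cs) ['q','u']).toNat with hfdef
  have hfne : f ≠ 0 := by
    intro h; apply hpre; rw [h] at hf1; simpa using hf1
  obtain ⟨fk, hfk⟩ : ∃ fk, f = fk + 1 := ⟨f - 1, by omega⟩
  rw [hfk] at hf1 hf2
  have hdrop : (c :: cs).drop (fk + 1) = cs.drop fk := rfl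
  rw [hdrop] at hf1
  have hin' : PySem.Chars.isIn ['q','u'] cs = true := by
    rw [PySem.Chars.isIn_iff_infix]
    exact hf1.isInfix.trans (List.drop_suffix _ _).isInfix
  have hg0 : 0 ≤ PySem.Chars.find cs ['q','u'] := by
    rw [PySem.Chars.find_nonneg_iff]; exact (PySem.Chars.isIn_iff_infix _ _).mp hin'
  obtain ⟨hg1, hg2⟩ := PySem.Chars.find_spec (s := cs) (sub := ['q','u']) hg0
  set g := (PySem.Chars.find cs ['q','u']).toNat with hgdef
  have hgle : g ≤ fk := by
    by_contra h
    exact hg2 fk (by omega) hf1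
  have hfle : fk ≤ g := by
    by_contra h
    exact hf2 (g + 1) (by omega) (by simpa using hg1)
  exact ⟨hin', by omega⟩

theorem pv_slice_two (cs : List Char) :
    PySem.Chars.slice cs none (some 2) = cs.take 2 := by
  rw [PySem.Chars.slice_eq_listSlice, PySem.List.slice_to _ (by norm_num)]
  have h2 : (2 : Int).toNat = 2 := rfl
  rw [h2]

theorem pv_slice_find (cs : List Char) (h : 0 ≤ PySem.Chars.find cs ['q','u']) :
    PySem.Chars.slice cs none (some (PySem.Chars.find cs ['q','u']))
      = cs.take (PySem.Chars.find cs ['q','u']).toNat := by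
  rw [PySem.Chars.slice_eq_listSlice, PySem.List.slice_to _ h]

-- head vowel: A returns false
theorem pv_Acore_vowel (c : Char) (cs : List Char) (hv : pvVowelb c = true) :
    Acore (c :: cs) = false := by
  have hcq : c ≠ 'q' := by rintro rfl; simp [pvVowelb] at hv
  unfold Acore
  by_cases hin : PySem.Chars.isIn ['q','u'] (c :: cs) = true
  · rw [if_pos hin]
    have hpre : ¬ (['q','u'] <+: (c :: cs)) := by
      rintro h
      obtain ⟨h1, -⟩ := List.cons_prefix_cons.mp h
      exact hcq h1.symm
    have hsl : PySem.Chars.slice (c :: cs) none (some 2) ≠ ['q','u'] := by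
      rw [pv_slice_two]
      intro h
      cases cs with
      | nil => simp at h
      | cons d cs' =>
        simp [List.take] at h
        exact hcq h.1
    rw [if_neg hsl]
    obtain ⟨-, hshift⟩ := pv_find_cons c cs hin hpre
    have h0 : 0 ≤ PySem.Chars.find (c :: cs) ['q','u'] := by
      rw [PySem.Chars.find_nonneg_iff]; exact (PySem.Chars.isIn_iff_infix _ _).mp hin
    rw [pv_slice_find _ h0, hshift]
    simp [List.take_succ_cons, pvALoop_cons, hv]
  · rw [if_neg hin]

theorem pv_Acore_nil : Acore [] = false := by decide

theorem pv_Acore_single (c : Char) : Acore [c] = false := by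
  unfold Acore
  have hin : PySem.Chars.isIn ['q','u'] [c] = false := by
    rw [PySem.Chars.isIn_eq_false_iff]
    intro h
    have := h.sublist.length_le
    simp at this
  rw [hin]
  simp

theorem pv_Acore_qu (cs : List Char) : Acore ('q' :: 'u' :: cs) = true := by
  unfold Acore
  have hpre : (['q','u'] : List Char) <+: ('q' :: 'u' :: cs) := ⟨cs, rfl⟩
  have hin : PySem.Chars.isIn ['q','u'] ('q' :: 'u' :: cs) = true := by
    rw [PySem.Chars.isIn_iff_infix]; exact hpre.isInfix
  have hsl : PySem.List.slice ('q' :: 'u' :: cs) none (some 2) = ['q','u'] := by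
    rw [← PySem.Chars.slice_eq_listSlice, pv_slice_two]
    rfl
  simp [hin, hsl]

-- nonvowel then vowel head, not "qu": A returns false
theorem pv_Acore_nv_v (c d : Char) (cs : List Char)
    (hc : pvVowelb c = false) (hd : pvVowelb d = true)
    (hne : ¬ (c = 'q' ∧ d = 'u')) :
    Acore (c :: d :: cs) = false := by
  have hdq : d ≠ 'q' := by rintro rfl; simp [pvVowelb] at hd
  unfold Acore
  by_cases hin : PySem.Chars.isIn ['q','u'] (c :: d :: cs) = true
  · rw [if_pos hin]
    have hpre : ¬ (['q','u'] <+: (c :: d :: cs)) := by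
      intro h
      obtain ⟨h1, h2⟩ := List.cons_prefix_cons.mp h
      obtain ⟨h3, -⟩ := List.cons_prefix_cons.mp h2
      exact hne ⟨h1.symm, h3.symm⟩
    have hsl : PySem.Chars.slice (c :: d :: cs) none (some 2) ≠ ['q','u'] := by
      rw [pv_slice_two]
      intro h
      simp [List.take] at h
      exact hne ⟨h.1, h.2⟩
    rw [if_neg hsl]
    obtain ⟨hin2, hshift⟩ := pv_find_cons c (d :: cs) hin hpre
    have hpre2 : ¬ (['q','u'] <+: (d :: cs)) := by
      intro h
      obtain ⟨h1, -⟩ := List.cons_prefix_cons.mp h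
      exact hdq h1.symm
    obtain ⟨-, hshift2⟩ := pv_find_cons d cs hin2 hpre2
    have h0 : 0 ≤ PySem.Chars.find (c :: d :: cs) ['q','u'] := by
      rw [PySem.Chars.find_nonneg_iff]; exact (PySem.Chars.isIn_iff_infix _ _).mp hin
    rw [pv_slice_find _ h0, hshift, hshift2]
    simp [List.take_succ_cons, pvALoop_cons, hc, hd]
  · rw [if_neg hin]

-- nonvowel head, next not 'u' if head is 'q': A(c::rest) = A(rest) for rest = d::cs with d nonvowel
theorem pv_Acore_step (c d : Char) (cs : List Char)
    (hc : pvVowelb c = false) (hd : pvVowelb d = false) :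
    Acore (c :: d :: cs) = Acore (d :: cs) := by
  have hdu : d ≠ 'u' := by rintro rfl; simp [pvVowelb] at hd
  have hpre : ¬ (['q','u'] <+: (c :: d :: cs)) := by
    intro h
    obtain ⟨-, h2⟩ := List.cons_prefix_cons.mp h
    obtain ⟨h3, -⟩ := List.cons_prefix_cons.mp h2
    exact hdu h3.symm
  have hiniff : PySem.Chars.isIn ['q','u'] (c :: d :: cs)
      = PySem.Chars.isIn ['q','u'] (d :: cs) := by
    rw [Bool.eq_iff_iff, PySem.Chars.isIn_iff_infix, PySem.Chars.isIn_iff_infix]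
    constructor
    · intro h
      rcases List.infix_cons_iff.mp h with h | h
      · exact absurd h hpre
      · exact h
    · intro h; exact List.infix_cons_iff.mpr (Or.inr h)
  by_cases hin : PySem.Chars.isIn ['q','u'] (d :: cs) = true
  · have hin1 : PySem.Chars.isIn ['q','u'] (c :: d :: cs) = true := by rw [hiniff]; exact hin
    obtain ⟨-, hshift⟩ := pv_find_cons c (d :: cs) hin1 hpre
    have h0 : 0 ≤ PySem.Chars.find (c :: d :: cs) ['q','u'] := by
      rw [PySem.Chars.find_nonneg_iff]; exact (PySem.Chars.isIn_iff_infix _ _).mp hin1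
    have hg0 : 0 ≤ PySem.Chars.find (d :: cs) ['q','u'] := by
      rw [PySem.Chars.find_nonneg_iff]; exact (PySem.Chars.isIn_iff_infix _ _).mp hin
    have hsl1 : PySem.Chars.slice (c :: d :: cs) none (some 2) ≠ ['q','u'] := by
      rw [pv_slice_two]
      intro h
      simp [List.take] at h
      exact hdu h.2
    unfold Acore
    rw [hin1, hin, if_pos rfl, if_pos rfl, if_neg hsl1]
    rw [pv_slice_find _ h0, hshift, List.take_succ_cons, pvALoop_cons, hc]
    by_cases hsl2 : PySem.Chars.slice (d :: cs) none (some 2) = ['q','u']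
    · -- second prefix test true: find (d::cs) = 0, loop on take 0 = [] gives true
      rw [if_pos hsl2]
      rw [pv_slice_two] at hsl2
      have hpre2 : (['q','u'] : List Char) <+: (d :: cs) := by
        rw [List.prefix_iff_eq_take]; exact hsl2.symm
      have hg := PySem.Chars.find_spec (s := d :: cs) (sub := ['q','u']) hg0
      have hgz : (PySem.Chars.find (d :: cs) ['q','u']).toNat = 0 := by
        by_contra h
        exact hg.2 0 (by omega) (by simpa using hpre2)
      rw [hgz]
      simp [pvALoop]
    · rw [if_neg hsl2, pv_slice_find _ hg0]
      simp
  · have hin1 : PySem.Chars.isIn ['q','u'] (c :: d :: cs) = false := by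
      rw [hiniff]; simpa using hin
    unfold Acore
    rw [hin1]
    simp at hin
    rw [hin]
    simp

-- the core correspondence: after a nonvowel character c, A on (c::cs) is B's loop with prev = c
theorem pv_key (cs : List Char) : ∀ c, pvVowelb c = false →
    Acore (c :: cs) = pvBLoop (String.singleton c) cs := by
  induction cs with
  | nil => intro c _; rw [pv_Acore_single]; rfl
  | cons d cs' ih =>
    intro c hc
    by_cases hd : pvVowelb d = true
    · rw [pvBLoop]
      rw [pv_vowel_eq, hd, if_pos rfl, pv_singleton_eq_q]
      by_cases hqu : c = 'q' ∧ d = 'u'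
      · obtain ⟨rfl, rfl⟩ := hqu
        rw [pv_Acore_qu]
        decide
      · rw [pv_Acore_nv_v c d cs' hc hd hqu]
        rcases Decidable.em (d = 'u') with rfl | hdu
        · have hcq : c ≠ 'q' := fun h => hqu ⟨h, rfl⟩
          simp [hcq]
        · simp [hdu]
    · have hd' : pvVowelb d = false := by simpa using hd
      rw [pv_Acore_step c d cs' hc hd', ih d hd']
      rw [pvBLoop, pv_vowel_eq, hd']
      simp

theorem pv_main (text : String) : is_rule_3 text = is_rule_3_alt text := by
  rw [pv_bridgeA]
  unfold is_rule_3_alt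
  cases h : text.toList with
  | nil => rw [pv_Acore_nil]; rfl
  | cons c cs =>
    by_cases hv : pvVowelb c = true
    · rw [pv_Acore_vowel c cs hv, pvBLoop, pv_vowel_eq, hv]
      simp
    · have hv' : pvVowelb c = false := by simpa using hv
      rw [pv_key cs c hv', pvBLoop, pv_vowel_eq, hv']
      simp

-- ===== VERDICT (by name: the statement is the Claim_ definition above) =====
theorem is_rule_3_spec : Claim_equal_is_rule_3 := by
  intro text _
  unfold Spec_is_rule_3
  exact pv_main text
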